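-- pv_equiv track=rewrite | github.com/leepyone/scope-rec | cal_metric.py | calculate_repeat_rate
-- ===== SOURCE A (Python) =====
-- def calculate_repeat_rate(predict , k):
--     counts = {}
--     array = predict[:k]
--     for item in array:
--         if item in counts:
--             counts[item] += 1
--         else:
--             counts[item] = 1
--     dup_count = 0
--     for count in counts.values():
--         if count > 1:
--             dup_count += count-1
--
--     return dup_count
-- ===== SOURCE B (Python) =====
-- def calculate_repeat_rate(predict, k):
--     s = sorted(predict[:k])
--     return sum(1 for prev, cur in zip(s, s[1:]) if prev == cur)
-- ===== Notes on version B (the rewrite author's own statement) =====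
-- stated objective: alternative
-- what changed: Replaces A's counting-dict plus values-summing loop by sort-then-scan: sort the first k predictions and count adjacent equal pairs, which equals the number of excess duplicates since equal items become contiguous.
import Mathlib
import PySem

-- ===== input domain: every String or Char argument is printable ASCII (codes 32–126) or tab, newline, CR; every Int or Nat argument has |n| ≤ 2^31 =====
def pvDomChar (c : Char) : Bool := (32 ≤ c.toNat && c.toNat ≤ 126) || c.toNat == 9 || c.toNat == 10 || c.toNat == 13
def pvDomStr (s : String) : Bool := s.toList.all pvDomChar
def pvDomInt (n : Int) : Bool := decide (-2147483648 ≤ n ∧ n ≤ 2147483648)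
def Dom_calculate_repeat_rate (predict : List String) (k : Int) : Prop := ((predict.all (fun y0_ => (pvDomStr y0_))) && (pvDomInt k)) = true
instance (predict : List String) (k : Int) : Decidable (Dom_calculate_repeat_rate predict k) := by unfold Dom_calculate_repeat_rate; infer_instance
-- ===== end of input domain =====

-- B replaces A's counting dict and summing loop by sort-then-scan: sort the first k items and count adjacent equal pairs (alternative decomposition, not faster).

-- ===== PORT A =====
def calculate_repeat_rate (predict : List String) (k : Int) : Int :=
  let array := PySem.List.slice predict none (some k)
  let counts := array.foldl
    (fun d item =>
      if d.contains item then d.insert item (d.getD item 0 + 1)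
      else d.insert item 1)
    (PySem.Dict.empty : PySem.Dict String Int)
  counts.values.foldl (fun dup_count count => if count > 1 then dup_count + (count - 1) else dup_count) 0

-- ===== PORT B =====
def calculate_repeat_rate_alt (predict : List String) (k : Int) : Int :=
  let s := PySem.List.sorted (PySem.List.slice predict none (some k)) (fun x => x) false
  (s.zip (PySem.List.slice s (some 1) none)).foldl
    (fun acc p => if p.1 == p.2 then acc + 1 else acc) 0

-- ===== PRECONDITION & SPEC =====
def Spec_calculate_repeat_rate (predict : List String) (k : Int) (out : Int) : Prop := out = calculate_repeat_rate_alt predict k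
instance (predict : List String) (k : Int) (out : Int) : Decidable (Spec_calculate_repeat_rate predict k out) := by unfold Spec_calculate_repeat_rate; infer_instance

-- ===== CLAIM =====
def Claim_equal_calculate_repeat_rate : Prop := ∀ (predict : List String) (k : Int), Dom_calculate_repeat_rate predict k → Spec_calculate_repeat_rate predict k (calculate_repeat_rate predict k)

-- ===== LEMMAS AND PROOFS =====

-- A's dict-building loop is exactly Counter(array): in the not-contains branch getD is 0.
theorem pv_fold_eq_counter (arr : List String) :
    arr.foldl
      (fun d item =>
        if d.contains item then d.insert item (d.getD item 0 + 1)
        else d.insert item 1)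
      (PySem.Dict.empty : PySem.Dict String Int) = PySem.Dict.counter arr := by
  rw [← PySem.Dict.foldl_insert_getD_add_one_eq_counter]
  congr 1
  funext d item
  by_cases h : d.contains item
  · simp [h]
  · simp only [h, Bool.false_eq_true, if_false]
    rw [PySem.Dict.getD_of_not_contains d 0 (by simpa using h)]; norm_num

-- the summing loop as a map-sum
theorem pv_sum_loop (vals : List Int) :
    vals.foldl (fun acc c => if c > 1 then acc + (c - 1) else acc) 0
      = (vals.map (fun c => if c > 1 then c - 1 else 0)).sum := by
  have h : ∀ (a : Int), ∀ (l : List Int),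
      l.foldl (fun acc c => if c > 1 then acc + (c - 1) else acc) a
        = a + (l.map (fun c => if c > 1 then c - 1 else 0)).sum := by
    intro a l
    induction l generalizing a with
    | nil => simp
    | cons x xs ih => simp only [List.foldl_cons, List.map_cons, List.sum_cons, ih]; split_ifs <;> ring
  simpa using h 0 vals

-- on a nodup list with the same members as arr.dedup, counts sum to arr.length
theorem pv_sum_counts (arr : List String) :
    ((PySem.Set.ofList arr).map (fun x => (arr.count x : Int))).sum = (arr.length : Int) := by
  have hperm : (PySem.Set.ofList arr).Perm arr.dedup := by
    rw [List.perm_ext_iff_of_nodup (PySem.Set.nodup_ofList arr) arr.nodup_dedup]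
    intro a
    rw [PySem.Set.mem_ofList, List.mem_dedup]
  calc ((PySem.Set.ofList arr).map (fun x => (arr.count x : Int))).sum
      = (arr.dedup.map (fun x => (arr.count x : Int))).sum := (hperm.map _).sum_eq
    _ = ((arr.dedup.map (fun x => arr.count x)).sum : Int) := by
        rw [Nat.cast_list_sum, List.map_map]; rfl
    _ = (arr.length : Int) := by rw [List.sum_map_count_dedup_eq_length]

-- A's value on any list: excess duplicates = length − number of distinct values
theorem pv_A_closed (arr : List String) :
    (((PySem.Dict.counter arr : PySem.Dict String Int)).values).foldl
        (fun acc c => if c > 1 then acc + (c - 1) else acc) 0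
      = (arr.length : Int) - (arr.dedup.length : Int) := by
  have hvals : ((PySem.Dict.counter arr : PySem.Dict String Int)).values
      = (PySem.Set.ofList arr).map (fun x => (arr.count x : Int)) := by
    show ((PySem.Dict.counter arr : PySem.Dict String Int)).items.map (·.2) = _
    rw [PySem.Dict.items_counter, List.map_map]
    rfl
  have hsetlen : ((PySem.Set.ofList arr).length : Int) = (arr.dedup.length : Int) := by
    have hperm : (PySem.Set.ofList arr).Perm arr.dedup := by
      rw [List.perm_ext_iff_of_nodup (PySem.Set.nodup_ofList arr) arr.nodup_dedup]
      intro a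
      rw [PySem.Set.mem_ofList, List.mem_dedup]
    exact_mod_cast congrArg Nat.cast hperm.length_eq
  rw [hvals, pv_sum_loop, List.map_map]
  have hpt : ∀ x ∈ PySem.Set.ofList arr,
      ((fun c : Int => if c > 1 then c - 1 else 0) ∘ fun x => (arr.count x : Int)) x
        = (arr.count x : Int) - 1 := by
    intro x hx
    have hc : 1 ≤ arr.count x := List.count_pos_iff.mpr ((PySem.Set.mem_ofList arr x).mp hx)
    simp only [Function.comp]
    split_ifs with h
    · rfl
    · omega
  rw [List.map_congr_left hpt]
  have : ((PySem.Set.ofList arr).map (fun x => (arr.count x : Int) - 1)).sum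
      = ((PySem.Set.ofList arr).map (fun x => (arr.count x : Int))).sum
        - ((PySem.Set.ofList arr).length : Int) := by
    induction PySem.Set.ofList arr with
    | nil => simp
    | cons y ys ih => simp [ih]; ring
  rw [this, pv_sum_counts, hsetlen]

-- on a ≤-sorted list, the number of adjacent equal pairs equals length − number of distinct values
theorem pv_adj_sorted (s : List String) (hs : s.Pairwise (· ≤ ·)) :
    ((s.zip s.tail).countP (fun p => p.1 == p.2) : Int)
      = (s.length : Int) - (s.dedup.length : Int) := by
  induction s with
  | nil => simp
  | cons x xs ih =>
    cases xs with
    | nil => simp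
    | cons y t =>
      have hxy : x ≤ y := (List.pairwise_cons.mp hs).1 y (by simp)
      have htail : (y :: t).Pairwise (· ≤ ·) := (List.pairwise_cons.mp hs).2
      have hmem : x ∈ y :: t ↔ x = y := by
        constructor
        · intro hm
          rcases List.mem_cons.mp hm with h | h
          · exact h
          · exact le_antisymm hxy ((List.pairwise_cons.mp htail).1 x h)
        · intro h; simp [h]
      have ihh := ih htail
      by_cases hxe : x = y
      · rw [List.dedup_cons_of_mem (hmem.mpr hxe)]
        simp only [List.tail_cons, List.zip_cons_cons, List.countP_cons]
        simp only [hxe, beq_self_eq_true]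
        subst hxe
        simp only [List.tail_cons] at ihh
        try simp only [List.length_cons] at ihh
        try simp only [List.length_cons]
        push_cast
        push_cast at ihh
        omega
      · rw [List.dedup_cons_of_notMem (fun hm => hxe (hmem.mp hm))]
        simp only [List.tail_cons, List.zip_cons_cons, List.countP_cons]
        have : (x == y) = false := by simp [hxe]
        simp only [this, Bool.false_eq_true, if_false]
        simp only [List.tail_cons] at ihh
        try simp only [List.length_cons] at ihh
        try simp only [List.length_cons]
        push_cast
        push_cast at ihh
        omega

-- ===== VERDICT =====
theorem calculate_repeat_rate_spec : Claim_equal_calculate_repeat_rate := by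
  intro predict k _
  show ((PySem.List.slice predict none (some k)).foldl
      (fun d item =>
        if d.contains item then d.insert item (d.getD item 0 + 1)
        else d.insert item 1)
      (PySem.Dict.empty : PySem.Dict String Int)).values.foldl
      (fun dup_count count => if count > 1 then dup_count + (count - 1) else dup_count) 0
    = calculate_repeat_rate_alt predict k
  rw [pv_fold_eq_counter, pv_A_closed]
  set arr := PySem.List.slice predict none (some k) with harr
  set s := PySem.List.sorted arr (fun x => x) false with hsdef
  have hperm : s.Perm arr := PySem.List.sorted_perm arr (fun x => x) false
  have hB : calculate_repeat_rate_alt predict k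
      = ((s.zip s.tail).countP (fun p => p.1 == p.2) : Int) := by
    show (s.zip (PySem.List.slice s (some 1) none)).foldl
        (fun acc p => if p.1 == p.2 then acc + 1 else acc) 0
      = ((s.zip s.tail).countP (fun p => p.1 == p.2) : Int)
    rw [PySem.List.slice_from_one, PySem.List.foldl_count_if]
    simp
  rw [hB, pv_adj_sorted s (PySem.List.sorted_pairwise arr (fun x => x))]
  rw [hperm.length_eq, hperm.dedup.length_eq]
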